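-- pv_equiv track=rewrite | github.com/michaelrios2015/ML | hw0.py | neighborClassify
-- ===== SOURCE A (Python) =====
-- def neighborClassify(featureArray, trainArray):
--
--     # where we store our answers
--     final = []
--
--     for feature in featureArray:
--
--         # we just assume that the feature will be closet to the first entry of the trainArray, we will then
--         # check
--         minDistance = abs(feature - trainArray[0][0])
--         classChoosen = trainArray[0][1]
--
--         # using brute force here, ee should use a binary search but I was not sure how much time I had
--         for train in trainArray:
--             # see if we get a new minDistance, note if we are tied on minDistance
--             # then whichever class appeared first is choosen
--             if minDistance > abs(feature - train[0]):
--                 # if so switch it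
--                 minDistance = abs(feature - train[0])
--                 classChoosen = train[1]
--         # insert the choosen class into our list of results
--         final.insert(len(final), int(classChoosen))
--
--     return final
-- ===== SOURCE B (Python) =====
-- from bisect import bisect_left
--
-- def neighborClassify(featureArray, trainArray):
--     # value -> (first index in trainArray, label at that first occurrence)
--     first = {}
--     for i, row in enumerate(trainArray):
--         v = row[0]
--         if v not in first:
--             first[v] = (i, int(row[1]))
--     vals = sorted(first)
--     final = []
--     for f in featureArray:
--         pos = bisect_left(vals, f)
--         if pos == len(vals):
--             v = vals[pos - 1]
--         elif pos == 0:
--             v = vals[0]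
--         else:
--             lo, hi = vals[pos - 1], vals[pos]
--             if f - lo < hi - f:
--                 v = lo
--             elif hi - f < f - lo:
--                 v = hi
--             else:
--                 # distance tie: the value whose first occurrence comes earlier wins
--                 v = lo if first[lo][0] < first[hi][0] else hi
--         final.append(first[v][1])
--     return final
-- ===== Notes on version B (the rewrite author's own statement) =====
-- stated objective: faster
-- what changed: Replaces A's per-feature linear scan of trainArray with a first-occurrence table (value -> (first index, label)) built once, plus one binary search (bisect_left) per feature over the sorted distinct training values, breaking distance ties by earliest first-occurrence index to match A's first-seen rule.
-- outside the precondition, e.g. on neighborClassify([], [[]]): A returns [], B raises IndexError; on neighborClassify([0], [[1, 2], [3]]): A returns [2], B raises IndexError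
import Mathlib
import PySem

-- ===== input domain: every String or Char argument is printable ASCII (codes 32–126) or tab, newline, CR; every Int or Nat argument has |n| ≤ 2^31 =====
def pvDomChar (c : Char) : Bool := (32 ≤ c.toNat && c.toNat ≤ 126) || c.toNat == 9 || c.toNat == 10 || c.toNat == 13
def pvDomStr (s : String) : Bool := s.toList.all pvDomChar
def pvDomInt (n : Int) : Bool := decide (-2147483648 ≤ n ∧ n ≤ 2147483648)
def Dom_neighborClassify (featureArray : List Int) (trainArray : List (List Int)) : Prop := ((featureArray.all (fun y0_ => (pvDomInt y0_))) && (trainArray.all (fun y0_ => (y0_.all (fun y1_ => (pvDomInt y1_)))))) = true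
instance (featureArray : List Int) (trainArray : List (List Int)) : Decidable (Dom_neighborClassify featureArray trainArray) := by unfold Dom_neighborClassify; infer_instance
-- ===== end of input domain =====

-- B replaces A's per-feature linear scan of trainArray by a first-occurrence table plus one
-- binary search in the sorted distinct training values: O((n+m)·log) instead of O(n·m).

-- ===== PORT A =====
-- inner loop body: 'if minDistance > abs(feature - train[0]): minDistance, classChoosen = ...'
def pvStepA (feature : Int) (st : Int × Int) (train : List Int) : Int × Int :=
  if st.1 > |feature - PySem.List.pyGetD train 0 0| then
    (|feature - PySem.List.pyGetD train 0 0|, PySem.List.pyGetD train 1 0)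
  else st

-- one iteration of the outer loop: scan trainArray, return int(classChoosen)
-- (int() on an int is the identity, so the port returns st.2 directly)
def pvOneA (trainArray : List (List Int)) (feature : Int) : Int :=
  (trainArray.foldl (pvStepA feature)
    (|feature - PySem.List.pyGetD (PySem.List.pyGetD trainArray 0 []) 0 0|,
     PySem.List.pyGetD (PySem.List.pyGetD trainArray 0 []) 1 0)).2

def neighborClassify (featureArray : List Int) (trainArray : List (List Int)) : List Int :=
  featureArray.foldl
    (fun final feature => PySem.List.insert final (PySem.List.len final) (pvOneA trainArray feature))
    []

-- ===== PORT B =====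
-- 'if v not in first: first[v] = (i, int(row[1]))' over enumerate(trainArray)
def pvBuildStep (d : PySem.Dict Int (Int × Int)) (p : Int × List Int) : PySem.Dict Int (Int × Int) :=
  if d.contains (PySem.List.pyGetD p.2 0 0) then d
  else d.insert (PySem.List.pyGetD p.2 0 0) (p.1, PySem.List.pyGetD p.2 1 0)

def pvBuildFirst (trainArray : List (List Int)) : PySem.Dict Int (Int × Int) :=
  (PySem.List.enumerate trainArray).foldl pvBuildStep PySem.Dict.empty

-- one iteration of Source B's feature loop; vals[pos], vals[pos-1], first[v] are in range /
-- present whenever Python's are, so List.getD / Dict.getD are exact there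
def pvOneB (first : PySem.Dict Int (Int × Int)) (vals : List Int) (f : Int) : Int :=
  let pos := PySem.List.bisectLeft vals f
  let v :=
    if pos = vals.length then vals.getD (pos - 1) 0
    else if pos = 0 then vals.getD 0 0
    else
      let lo := vals.getD (pos - 1) 0
      let hi := vals.getD pos 0
      if f - lo < hi - f then lo
      else if hi - f < f - lo then hi
      else if (first.getD lo (0, 0)).1 < (first.getD hi (0, 0)).1 then lo else hi
  (first.getD v (0, 0)).2

def neighborClassify_alt (featureArray : List Int) (trainArray : List (List Int)) : List Int :=
  let first := pvBuildFirst trainArray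
  let vals := PySem.List.sorted first.keys (fun x => x)
  featureArray.foldl (fun final f => final ++ [pvOneB first vals f]) []

-- ===== PRECONDITION & SPEC =====
-- Pre_ excludes the inputs where Python raises IndexError (empty trainArray with features to
-- classify, or a training row shorter than the (value, label) shape both programs read); it
-- also excludes rows of length < 2 whose label A happens never to read (A returns, B raises).
def Pre_neighborClassify (featureArray : List Int) (trainArray : List (List Int)) : Prop :=
  (∀ row ∈ trainArray, 2 ≤ row.length) ∧ (featureArray ≠ [] → trainArray ≠ [])

instance (featureArray : List Int) (trainArray : List (List Int)) : Decidable (Pre_neighborClassify featureArray trainArray) := by unfold Pre_neighborClassify; infer_instance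

def pvWitness_neighborClassify : List Int × List (List Int) := ([1, -3, 7], [[0, 1], [2, 2], [-4, 0]])

def Spec_neighborClassify (featureArray : List Int) (trainArray : List (List Int)) (out : List Int) : Prop := out = neighborClassify_alt featureArray trainArray
instance (featureArray : List Int) (trainArray : List (List Int)) (out : List Int) : Decidable (Spec_neighborClassify featureArray trainArray out) := by unfold Spec_neighborClassify; infer_instance

-- ===== CLAIM (what is proved, stated in full; the proofs are below) =====
def Claim_equal_neighborClassify : Prop := ∀ (featureArray : List Int) (trainArray : List (List Int)), Dom_neighborClassify featureArray trainArray → Pre_neighborClassify featureArray trainArray → Spec_neighborClassify featureArray trainArray (neighborClassify featureArray trainArray)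

-- ===== LEMMAS AND PROOFS =====

-- row accessors shared by the reasoning
def pvVal (r : List Int) : Int := PySem.List.pyGetD r 0 0
def pvLab (r : List Int) : Int := PySem.List.pyGetD r 1 0
def pvDist (f : Int) (r : List Int) : Int := |f - pvVal r|

-- reference selector: first (indexed) row of minimal distance
def pvSel (f : Int) : List (Int × List Int) → Option (Int × List Int)
  | [] => none
  | p :: ps =>
    match pvSel f ps with
    | none => some p
    | some q => if pvDist f q.2 < pvDist f p.2 then some q else some p

theorem pvSel_eq_none_iff (f : Int) (E : List (Int × List Int)) : pvSel f E = none ↔ E = [] := by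
  cases E with
  | nil => simp [pvSel]
  | cons p ps =>
    simp only [pvSel]
    cases pvSel f ps with
    | none => simp
    | some q => by_cases h : pvDist f q.2 < pvDist f p.2 <;> simp [h]

theorem pvSel_spec (f : Int) (E : List (Int × List Int)) (q : Int × List Int)
    (hpw : E.Pairwise (fun p q => p.1 < q.1)) (h : pvSel f E = some q) :
    q ∈ E ∧ (∀ r ∈ E, pvDist f q.2 ≤ pvDist f r.2) ∧
      (∀ r ∈ E, pvDist f r.2 ≤ pvDist f q.2 → q.1 ≤ r.1) := by
  induction E generalizing q with
  | nil => simp [pvSel] at h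
  | cons p ps ih =>
    have hpw' : ps.Pairwise (fun p q => p.1 < q.1) := (List.pairwise_cons.mp hpw).2
    have hplt : ∀ r ∈ ps, p.1 < r.1 := (List.pairwise_cons.mp hpw).1
    simp only [pvSel] at h
    cases hsel : pvSel f ps with
    | none =>
      have hps : ps = [] := (pvSel_eq_none_iff f ps).mp hsel
      rw [hsel] at h
      simp at h
      subst h hps
      refine ⟨by simp, ?_, ?_⟩ <;> intro r hr <;> simp at hr <;> subst hr <;> simp
    | some q' =>
      rw [hsel] at h
      obtain ⟨hq'mem, hq'min, hq'first⟩ := ih q' hpw' hsel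
      by_cases hlt : pvDist f q'.2 < pvDist f p.2
      · simp [hlt] at h
        subst h
        refine ⟨List.mem_cons_of_mem _ hq'mem, ?_, ?_⟩
        · intro r hr
          rcases List.mem_cons.mp hr with h1 | h1
          · subst h1; exact le_of_lt hlt
          · exact hq'min r h1
        · intro r hr hle
          rcases List.mem_cons.mp hr with h1 | h1
          · subst h1; omega
          · exact hq'first r h1 hle
      · simp [hlt] at h
        subst h
        refine ⟨List.mem_cons_self, ?_, ?_⟩
        · intro r hr
          rcases List.mem_cons.mp hr with h1 | h1
          · subst h1; omega
          · have := hq'min r h1; omega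
        · intro r hr _
          rcases List.mem_cons.mp hr with h1 | h1
          · subst h1; omega
          · exact le_of_lt (hplt r h1)

-- A's inner fold over enumerate(trainArray), projected back
theorem pvFoldA_enum (f : Int) (xs : List (List Int)) (s : Int) (st : Int × Int) :
    (PySem.List.enumerate xs s).foldl (fun st p => pvStepA f st p.2) st = xs.foldl (pvStepA f) st := by
  induction xs generalizing s st with
  | nil => simp [PySem.List.enumerate_nil]
  | cons x xs ih => rw [PySem.List.enumerate_cons]; simp only [List.foldl_cons]; exact ih _ _

-- A's fold computes the selector
theorem pvFoldA_sel (f : Int) (E : List (Int × List Int)) (st : Int × Int) :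
    E.foldl (fun st p => pvStepA f st p.2) st =
      match pvSel f E with
      | none => st
      | some q => if pvDist f q.2 < st.1 then (pvDist f q.2, pvLab q.2) else st := by
  induction E generalizing st with
  | nil => simp [pvSel]
  | cons p ps ih =>
    simp only [List.foldl_cons, pvSel]
    rw [ih]
    cases hsel : pvSel f ps with
    | none => rfl
    | some q =>
      simp only [pvStepA, pvDist, pvVal, pvLab]
      split_ifs <;> dsimp only <;> split_ifs <;> first | rfl | omega

theorem pvOneA_eq_sel (f : Int) (T : List (List Int)) (hT : T ≠ []) :
    pvOneA T f = pvLab ((pvSel f (PySem.List.enumerate T)).getD (0, [])).2 := by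
  obtain ⟨r, rs, rfl⟩ := List.exists_cons_of_ne_nil hT
  have h0 : PySem.List.pyGetD (r :: rs : List (List Int)) 0 [] = r := by
    simp [PySem.List.pyGetD_zero_cons]
  unfold pvOneA
  rw [h0, ← pvFoldA_enum f (r :: rs) 0, pvFoldA_sel]
  cases hsel : pvSel f (PySem.List.enumerate (r :: rs)) with
  | none => simp [pvSel_eq_none_iff, PySem.List.enumerate_cons] at hsel
  | some q =>
    have hq := pvSel_spec f _ q (PySem.List.pairwise_lt_enumerate _ _) hsel
    have hrmem : (0, r) ∈ PySem.List.enumerate (r :: rs) (0 : Int) := by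
      rw [PySem.List.enumerate_cons]; exact List.mem_cons_self
    have hmin := hq.2.1 (0, r) hrmem
    simp only [pvDist, pvVal] at hmin ⊢
    split_ifs with h
    · simp
    · -- q not strictly closer than the head row: they are equally distant, and q is first,
      -- so q's distance equals the head's; the fold kept the head's state
      have heq : |f - PySem.List.pyGetD q.2 0 0| = |f - PySem.List.pyGetD r 0 0| := by omega
      -- q.1 ≤ 0 and head is at index 0; also 0 ≤ q.1 since all enumerate indices ≥ 0: q = (0, r)
      have hfirst := hq.2.2 (0, r) hrmem (by simp [pvDist, pvVal]; omega)
      -- show pvLab r = pvLab q.2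
      have hqmem := hq.1
      rw [PySem.List.enumerate_cons] at hqmem
      rcases List.mem_cons.mp hqmem with h1 | h1
      · subst h1; simp [pvLab]
      · exfalso
        have : ∀ p ∈ PySem.List.enumerate rs (0 + 1 : Int), (1 : Int) ≤ p.1 := by
          intro p hp
          rcases (PySem.List.mem_enumerate_iff _ _ _).mp hp with ⟨k, hk, rfl⟩
          omega
        have := this q h1
        omega

-- ===== B-side lemmas =====

-- the dict built by pvBuildStep holds, per value, its FIRST occurrence (index, label)
theorem pvBuild_get? (v : Int) (l : List (Int × List Int)) (d : PySem.Dict Int (Int × Int)) :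
    (l.foldl pvBuildStep d).get? v =
      match d.get? v with
      | some w => some w
      | none => (l.find? (fun p => pvVal p.2 == v)).map (fun p => (p.1, pvLab p.2)) := by
  induction l generalizing d with
  | nil => simp only [List.foldl_nil, List.find?_nil]; cases d.get? v <;> rfl
  | cons p l ih =>
    simp only [List.foldl_cons]
    rw [ih]
    unfold pvBuildStep
    rw [List.find?_cons]
    by_cases hc : d.contains (PySem.List.pyGetD p.2 0 0) = true
    · rw [if_pos hc]
      by_cases hv : pvVal p.2 = v
      · have : (d.get? v).isSome := by
          rw [PySem.Dict.contains_eq_isSome_get?] at hc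
          rw [← hv]; exact hc
        cases hd : d.get? v with
        | none => rw [hd] at this; simp at this
        | some w => simp
      · have hbe : (pvVal p.2 == v) = false := by simp [hv]
        rw [hbe]
    · rw [if_neg hc]
      by_cases hv : pvVal p.2 = v
      · have hd : d.get? v = none := by
          rw [PySem.Dict.get?_eq_none_iff_contains]
          rw [← hv]; simpa using hc
        -- the inserted key is exactly v; lookup finds the new entry
        have hv' : v = PySem.List.pyGetD p.2 0 0 := by rw [pvVal] at hv; omega
        have hins : (d.insert (PySem.List.pyGetD p.2 0 0) (p.1, PySem.List.pyGetD p.2 1 0)).get? v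
            = some (p.1, PySem.List.pyGetD p.2 1 0) := by
          rw [PySem.Dict.get?_insert, if_pos hv']
        rw [hins, hd]
        have hbe : (pvVal p.2 == v) = true := by simp [hv]
        rw [hbe]
        simp [pvLab]
      · have hbe : (pvVal p.2 == v) = false := by simp [hv]
        rw [hbe, PySem.Dict.get?_insert]
        rw [if_neg (by rw [pvVal] at hv; exact fun h => hv h.symm)]

theorem pvBuild_nodup (l : List (Int × List Int)) (d : PySem.Dict Int (Int × Int))
    (h : d.keys.Nodup) : (l.foldl pvBuildStep d).keys.Nodup := by
  induction l generalizing d with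
  | nil => exact h
  | cons p l ih =>
    simp only [List.foldl_cons]
    apply ih
    unfold pvBuildStep
    split_ifs
    · exact h
    · exact PySem.Dict.nodup_keys_insert _ _ _ h

-- a successful find? over a strictly index-increasing list is the first matching entry
theorem pvFind_first (v : Int) (E : List (Int × List Int)) (p : Int × List Int)
    (hpw : E.Pairwise (fun p q => p.1 < q.1))
    (h : E.find? (fun p => pvVal p.2 == v) = some p) :
    p ∈ E ∧ pvVal p.2 = v ∧ ∀ r ∈ E, pvVal r.2 = v → p.1 ≤ r.1 := by
  rw [List.find?_eq_some_iff_append] at h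
  obtain ⟨hp, as, bs, rfl, hnot⟩ := h
  have hpv : pvVal p.2 = v := by simpa using hp
  refine ⟨by simp, hpv, ?_⟩
  intro r hr hrv
  rcases List.mem_append.mp hr with h1 | h1
  · exfalso
    have := hnot r h1
    simp [hrv] at this
  · rcases List.mem_cons.mp h1 with h2 | h2
    · subst h2; omega
    · rw [List.pairwise_append] at hpw
      have h4 := (List.pairwise_cons.mp hpw.2.1).1 r h2
      omega

-- indices are unique in a strictly index-increasing list
theorem pvIdx_inj (E : List (Int × List Int)) (hpw : E.Pairwise (fun p q => p.1 < q.1))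
    (a b : Int × List Int) (ha : a ∈ E) (hb : b ∈ E) (h : a.1 = b.1) : a = b := by
  obtain ⟨i, hi, rfl⟩ := List.mem_iff_getElem.mp ha
  obtain ⟨j, hj, rfl⟩ := List.mem_iff_getElem.mp hb
  rcases Nat.lt_trichotomy i j with hij | hij | hij
  · have := List.pairwise_iff_getElem.mp hpw i j hi hj hij; omega
  · subst hij; rfl
  · have := List.pairwise_iff_getElem.mp hpw j i hj hi hij; omega

-- membership in the sorted distinct values
theorem pvMem_vals (T : List (List Int)) (v : Int) :
    v ∈ PySem.List.sorted (pvBuildFirst T).keys (fun x => x) ↔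
      ∃ p ∈ PySem.List.enumerate T, pvVal p.2 = v := by
  rw [PySem.List.mem_sorted]
  constructor
  · intro hv
    have : (pvBuildFirst T).get? v ≠ none := fun h =>
      (PySem.Dict.get?_eq_none_iff_not_mem_keys _ _).mp h (by simpa using hv)
    rw [pvBuildFirst, pvBuild_get?] at this
    simp only [PySem.Dict.get?_empty] at this
    cases hf : (PySem.List.enumerate T).find? (fun p => pvVal p.2 == v) with
    | none => rw [hf] at this; simp at this
    | some p =>
      have := pvFind_first v _ p (PySem.List.pairwise_lt_enumerate _ _) hf
      exact ⟨p, this.1, this.2.1⟩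
  · intro ⟨p, hp, hpv⟩
    by_contra hv
    have : (pvBuildFirst T).get? v = none := by
      rw [PySem.Dict.get?_eq_none_iff_not_mem_keys]; simpa using hv
    rw [pvBuildFirst, pvBuild_get?] at this
    simp only [PySem.Dict.get?_empty] at this
    cases hf : (PySem.List.enumerate T).find? (fun p => pvVal p.2 == v) with
    | some q => rw [hf] at this; simp at this
    | none =>
      rw [List.find?_eq_none] at hf
      have := hf p hp
      simp [hpv] at this

theorem pvVals_lt (T : List (List Int)) :
    (PySem.List.sorted (pvBuildFirst T).keys (fun x => x)).Pairwise (· < ·) := by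
  have h1 := PySem.List.sorted_pairwise (pvBuildFirst T).keys (fun x => x)
  have h2 : (PySem.List.sorted (pvBuildFirst T).keys (fun x => x)).Nodup := by
    have hperm := PySem.List.sorted_perm (pvBuildFirst T).keys (fun x => x) false
    exact hperm.nodup_iff.mpr (pvBuild_nodup _ _ PySem.Dict.nodup_keys_empty)
  have := h1.and h2
  exact this.imp (fun h => lt_of_le_of_ne h.1 h.2)

-- the dict lookup of a present value: first occurrence's (index, label)
theorem pvFirst_getD (T : List (List Int)) (v : Int)
    (hv : ∃ p ∈ PySem.List.enumerate T, pvVal p.2 = v) :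
    ∃ p, ((pvBuildFirst T).getD v (0, 0) = (p.1, pvLab p.2)) ∧ p ∈ PySem.List.enumerate T ∧
      pvVal p.2 = v ∧ ∀ r ∈ PySem.List.enumerate T, pvVal r.2 = v → p.1 ≤ r.1 := by
  cases hf : (PySem.List.enumerate T).find? (fun p => pvVal p.2 == v) with
  | none =>
    exfalso
    rw [List.find?_eq_none] at hf
    obtain ⟨p, hp, hpv⟩ := hv
    have := hf p hp
    simp [hpv] at this
  | some p =>
    have hff := pvFind_first v _ p (PySem.List.pairwise_lt_enumerate _ _) hf
    refine ⟨p, ?_, hff.1, hff.2.1, hff.2.2⟩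
    rw [PySem.Dict.getD_eq_get?_getD, pvBuildFirst, pvBuild_get?]
    simp [PySem.Dict.get?_empty, hf]

-- ===== main per-feature equality =====
theorem pvOneB_eq_sel (f : Int) (T : List (List Int)) (hT : T ≠ []) :
    pvOneB (pvBuildFirst T) (PySem.List.sorted (pvBuildFirst T).keys (fun x => x)) f =
      pvLab ((pvSel f (PySem.List.enumerate T)).getD (0, [])).2 := by
  cases hsel : pvSel f (PySem.List.enumerate T) with
  | none =>
    exfalso
    rw [pvSel_eq_none_iff] at hsel
    obtain ⟨r, rs, rfl⟩ := List.exists_cons_of_ne_nil hT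
    rw [PySem.List.enumerate_cons] at hsel
    simp at hsel
  | some q =>
    obtain ⟨hqmem, hqmin, hqfirst⟩ := pvSel_spec f _ q (PySem.List.pairwise_lt_enumerate _ _) hsel
    simp only [Option.getD_some]
    set vals := PySem.List.sorted (pvBuildFirst T).keys (fun x => x) with hvals
    have hvq : pvVal q.2 ∈ vals := (pvMem_vals T _).mpr ⟨q, hqmem, rfl⟩
    have hltv : vals.Pairwise (· < ·) := pvVals_lt T
    have hmono := List.pairwise_iff_getElem.mp hltv
    have hmle : ∀ i j (hi : i < vals.length) (hj : j < vals.length), i ≤ j → vals[i] ≤ vals[j] := by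
      intro i j hi hj hij
      rcases Nat.eq_or_lt_of_le hij with h | h
      · subst h; exact le_refl _
      · exact le_of_lt (hmono i j hi hj h)
    have hbs := PySem.List.bisectLeft_spec vals f (hltv.imp le_of_lt)
    have hminw : ∀ w ∈ vals, pvDist f q.2 ≤ |f - w| := by
      intro w hw
      obtain ⟨p, hp, rfl⟩ := (pvMem_vals T w).mp hw
      exact hqmin p hp
    have hlabel : ∀ v, v = pvVal q.2 → ((pvBuildFirst T).getD v (0, 0)).2 = pvLab q.2 := by
      intro v hv; subst hv
      obtain ⟨p, hgd, hpmem, hpv, hpfirst⟩ := pvFirst_getD T (pvVal q.2) ⟨q, hqmem, rfl⟩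
      have h1 : p.1 ≤ q.1 := hpfirst q hqmem rfl
      have h2 : q.1 ≤ p.1 := hqfirst p hpmem (le_of_eq (by simp [pvDist, hpv]))
      have hpq : p = q := pvIdx_inj _ (PySem.List.pairwise_lt_enumerate _ _) p q hpmem hqmem (by omega)
      rw [hgd, hpq]
    obtain ⟨kq, hkq, hkqe⟩ := List.mem_iff_getElem.mp hvq
    have hn : 0 < vals.length := by omega
    dsimp only [pvOneB]
    apply hlabel
    set pos := PySem.List.bisectLeft vals f with hpos
    by_cases hp1 : pos = vals.length
    · rw [if_pos hp1]
      have hn1 : vals.length - 1 < vals.length := by omega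
      have hgd : vals.getD (pos - 1) 0 = vals[vals.length - 1] := by
        rw [hp1]; exact List.getD_eq_getElem _ _ hn1
      have hlast : vals[kq] ≤ vals[vals.length - 1] := hmle kq (vals.length - 1) hkq hn1 (by omega)
      have hklt : vals[kq] < f := hbs.2.1 kq hkq (by omega)
      have hllt : vals[vals.length - 1] < f := hbs.2.1 _ hn1 (by omega)
      have hdq : pvDist f q.2 = f - vals[kq] := by
        rw [pvDist, ← hkqe]; exact abs_of_nonneg (by omega)
      have h3 := hminw vals[vals.length - 1] (List.getElem_mem hn1)
      rw [abs_of_nonneg (by omega), hdq] at h3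
      rw [hgd, ← hkqe]
      omega
    · by_cases hp0 : pos = 0
      · rw [if_neg hp1, if_pos hp0]
        have hgd : vals.getD 0 0 = vals[0] := List.getD_eq_getElem _ _ hn
        have hfirst : vals[0] ≤ vals[kq] := hmle 0 kq hn hkq (by omega)
        have hkge : f ≤ vals[kq] := hbs.2.2 kq hkq (by omega)
        have h0ge : f ≤ vals[0] := hbs.2.2 0 hn (by omega)
        have hdq : pvDist f q.2 = vals[kq] - f := by
          rw [pvDist, ← hkqe, abs_of_nonpos (by omega)]; ring
        have h3 := hminw vals[0] (List.getElem_mem hn)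
        rw [abs_of_nonpos (by omega), hdq] at h3
        rw [hgd, ← hkqe]
        omega
      · rw [if_neg hp1, if_neg hp0]
        have hposn : pos < vals.length := lt_of_le_of_ne hbs.1 hp1
        have hpos0 : 0 < pos := Nat.pos_of_ne_zero hp0
        have hn1 : pos - 1 < vals.length := by omega
        have hgdlo : vals.getD (pos - 1) 0 = vals[pos - 1] := List.getD_eq_getElem _ _ hn1
        have hgdhi : vals.getD pos 0 = vals[pos] := List.getD_eq_getElem _ _ hposn
        rw [hgdlo, hgdhi]
        have hlof : vals[pos - 1] < f := hbs.2.1 (pos - 1) hn1 (by omega)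
        have hfhi : f ≤ vals[pos]   := hbs.2.2 pos hposn (by omega)
        have hlohi : vals[pos - 1] < vals[pos] := hmono (pos - 1) pos hn1 hposn (by omega)
        have hsplit : vals[kq] ≤ vals[pos - 1] ∨ vals[pos] ≤ vals[kq] := by
          by_cases h : kq < pos
          · exact Or.inl (hmle kq (pos - 1) hkq hn1 (by omega))
          · exact Or.inr (hmle pos kq hposn hkq (by omega))
        have hdlo := hminw vals[pos - 1] (List.getElem_mem hn1)
        rw [abs_of_nonneg (by omega)] at hdlo
        have hdhi := hminw vals[pos] (List.getElem_mem hposn)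
        rw [abs_of_nonpos (by omega)] at hdhi
        have hdqlo : vals[kq] ≤ vals[pos - 1] → pvDist f q.2 = f - vals[kq] := by
          intro h; rw [pvDist, ← hkqe]; exact abs_of_nonneg (by omega)
        have hdqhi : vals[pos] ≤ vals[kq] → pvDist f q.2 = vals[kq] - f := by
          intro h; rw [pvDist, ← hkqe, abs_of_nonpos (by omega)]; ring
        by_cases hc1 : f - vals[pos - 1] < vals[pos] - f
        · rw [if_pos hc1, ← hkqe]
          rcases hsplit with h | h
          · have := hdqlo h; omega
          · have := hdqhi h; omega
        · by_cases hc2 : vals[pos] - f < f - vals[pos - 1]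
          · rw [if_neg hc1, if_pos hc2, ← hkqe]
            rcases hsplit with h | h
            · have := hdqlo h; omega
            · have := hdqhi h; omega
          · rw [if_neg hc1, if_neg hc2]
            -- exact tie: decide by earliest first occurrence, like A's first-seen rule
            have hlomem : vals[pos - 1] ∈ vals := List.getElem_mem hn1
            have hhimem : vals[pos] ∈ vals := List.getElem_mem hposn
            obtain ⟨plo, hgdplo, hplomem, hplov, hplofirst⟩ :=
              pvFirst_getD T vals[pos - 1] ((pvMem_vals T _).mp hlomem)
            obtain ⟨phi, hgdphi, hphimem, hphiv, hphifirst⟩ :=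
              pvFirst_getD T vals[pos] ((pvMem_vals T _).mp hhimem)
            rw [hgdplo, hgdphi]
            dsimp only
            have hvqe : vals[kq] = vals[pos - 1] ∨ vals[kq] = vals[pos] := by
              rcases hsplit with h | h
              · have := hdqlo h; left; omega
              · have := hdqhi h; right; omega
            have hnei : plo.1 ≠ phi.1 := by
              intro h
              have := pvIdx_inj _ (PySem.List.pairwise_lt_enumerate _ _) plo phi hplomem hphimem h
              rw [this] at hplov
              omega
            have hdplo : pvDist f plo.2 = f - vals[pos - 1] := by
              rw [pvDist, hplov]; exact abs_of_nonneg (by omega)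
            have hdphi : pvDist f phi.2 = vals[pos] - f := by
              rw [pvDist, hphiv, abs_of_nonpos (by omega)]; ring
            by_cases hb : plo.1 < phi.1
            · rw [if_pos hb, ← hkqe]
              rcases hvqe with h | h
              · omega
              · exfalso
                have hdq : pvDist f q.2 = vals[pos] - f := by
                  rw [pvDist, ← hkqe, h, abs_of_nonpos (by omega)]; ring
                have h5 : q.1 ≤ plo.1 := hqfirst plo hplomem (by omega)
                have h6 : phi.1 ≤ q.1 := hphifirst q hqmem (by omega)
                omega
            · rw [if_neg hb, ← hkqe]
              rcases hvqe with h | h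
              · exfalso
                have hdq : pvDist f q.2 = f - vals[pos - 1] := by
                  rw [pvDist, ← hkqe, h]; exact abs_of_nonneg (by omega)
                have h5 : q.1 ≤ phi.1 := hqfirst phi hphimem (by omega)
                have h6 : plo.1 ≤ q.1 := hplofirst q hqmem (by omega)
                omega
              · omega

theorem pvFold_insert_len (g : Int → Int) (fs : List Int) :
    fs.foldl (fun final feature => PySem.List.insert final (PySem.List.len final) (g feature)) [] =
      fs.map g := by
  have : ∀ acc : List Int, fs.foldl (fun final feature => PySem.List.insert final (PySem.List.len final) (g feature)) acc = acc ++ fs.map g := by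
    induction fs with
    | nil => intro acc; simp
    | cons x xs ih =>
      intro acc
      rw [List.foldl_cons, PySem.List.insert_len, ih]
      simp
  simpa using this []

-- ===== VERDICT (by name: the statement is the Claim_ definition above) =====
theorem neighborClassify_spec : Claim_equal_neighborClassify := by
  intro fs T _ hpre
  unfold Spec_neighborClassify neighborClassify neighborClassify_alt
  rw [pvFold_insert_len, PySem.List.foldl_append_singleton_eq_map]
  simp only [List.nil_append]
  cases fs with
  | nil => simp
  | cons f fs' =>
    have hT : T ≠ [] := hpre.2 (by simp)
    apply List.map_congr_left
    intro a _
    rw [pvOneA_eq_sel a T hT, pvOneB_eq_sel a T hT]
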